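-- pv_equiv track=rewrite | github.com/Nakshathra-2808/FinTrustRAG | backend/ingestion.py | split_page_into_blocks
-- ===== SOURCE A (Python) =====
-- def is_table_line(line: str) -> bool:
--     """Detect markdown table rows: |col|col| or |---|---|"""
--     stripped = line.strip()
--     return stripped.startswith("|") and stripped.endswith("|")
--
-- def split_page_into_blocks(text: str) -> list:
--     """
--     Split a page into blocks, keeping markdown tables intact.
--     Returns list of (block_text, is_table) tuples.
--
--     WHY: Word-count chunking splits tables mid-row,
--     cutting off financial figures. This keeps each table
--     as one atomic block so numbers are never separated
--     from their row headers.
--     """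
--     lines = text.split("\n")
--     blocks = []
--     current_block = []
--     in_table = False
--
--     for line in lines:
--         line_is_table = is_table_line(line)
--
--         if line_is_table and not in_table:
--             # Flush current prose block
--             if current_block:
--                 blocks.append(("\n".join(current_block), False))
--                 current_block = []
--             in_table = True
--             current_block.append(line)
--
--         elif not line_is_table and in_table:
--             # Flush current table block
--             if current_block:
--                 blocks.append(("\n".join(current_block), True))
--                 current_block = []
--             in_table = False
--             if line.strip():
--                 current_block.append(line)
--
--         else:
--             if line.strip():
--                 current_block.append(line)
--
--     # Flush whatever remains
--     if current_block:
--         blocks.append(("\n".join(current_block), in_table))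
--
--     return blocks
-- ===== SOURCE B (Python) =====
-- from itertools import groupby
--
-- def is_table_line(line: str) -> bool:
--     stripped = line.strip()
--     return stripped.startswith("|") and stripped.endswith("|")
--
-- def split_page_into_blocks(text: str) -> list:
--     blocks = []
--     for is_table, group in groupby(text.split("\n"), key=is_table_line):
--         lines = list(group)
--         if is_table:
--             blocks.append(("\n".join(lines), True))
--         else:
--             kept = [l for l in lines if l.strip()]
--             if kept:
--                 blocks.append(("\n".join(kept), False))
--     return blocks
-- ===== Notes on version B (the rewrite author's own statement) =====
-- stated objective: idiomatic
-- what changed: Replaced the explicit in_table/current_block/flush state machine with an itertools.groupby pass: lines are grouped by is_table_line and each group is emitted directly (table groups joined verbatim, prose groups filtered of blank lines and emitted only if non-empty).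
import Mathlib
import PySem

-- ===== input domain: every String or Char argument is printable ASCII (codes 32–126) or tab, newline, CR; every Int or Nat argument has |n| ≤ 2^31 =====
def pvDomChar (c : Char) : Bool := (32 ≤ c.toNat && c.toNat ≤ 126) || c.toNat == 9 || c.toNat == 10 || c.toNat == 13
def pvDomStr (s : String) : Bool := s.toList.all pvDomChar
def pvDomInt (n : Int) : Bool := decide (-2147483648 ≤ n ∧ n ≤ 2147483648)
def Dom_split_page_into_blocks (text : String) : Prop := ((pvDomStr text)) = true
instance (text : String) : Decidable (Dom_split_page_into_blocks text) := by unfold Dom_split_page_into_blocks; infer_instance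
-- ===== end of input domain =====

-- B replaces A's explicit in_table/flush state machine with a group-then-process pass (groupby by is_table_line); idiomatic, same cost.

-- text.split("\n"): exact via PySem.Chars.splitOn (separator "\n" is nonempty, so Python never raises)
def pySplitNL (text : String) : List String :=
  (PySem.Chars.splitOn text.toList ['\n']).map String.ofList

-- ===== PORT A =====
-- module helper is_table_line (shared by both sources)
def isTableLine (line : String) : Bool :=
  let stripped := PySem.Str.strip line
  PySem.Str.startswith stripped "|" && PySem.Str.endswith stripped "|"

-- the for-loop of A as structural recursion over the same state (blocks, current_block, in_table);
-- the [] case is the final flush after the loop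
def loopA : List String → List (String × Bool) → List String → Bool → List (String × Bool)
  | [], blocks, cur, t =>
      blocks ++ (if cur = [] then [] else [(PySem.Str.join "\n" cur, t)])
  | l :: ls, blocks, cur, t =>
      let lt := isTableLine l
      if lt && !t then
        loopA ls (blocks ++ (if cur = [] then [] else [(PySem.Str.join "\n" cur, false)])) [l] true
      else if !lt && t then
        loopA ls (blocks ++ (if cur = [] then [] else [(PySem.Str.join "\n" cur, true)]))
          (if PySem.Str.strip l ≠ "" then [l] else []) false
      else
        loopA ls blocks (if PySem.Str.strip l ≠ "" then cur ++ [l] else cur) t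

def split_page_into_blocks (text : String) : List (String × Bool) :=
  loopA (pySplitNL text) [] [] false

-- ===== PORT B =====
-- line truthiness test used by B's filtering
def keepLine (l : String) : Bool := PySem.Str.strip l != ""

-- hand port of itertools.groupby keyed by is_table_line (groups materialized in order)
def groupRuns : List String → List (Bool × List String)
  | [] => []
  | l :: ls =>
      let k := isTableLine l
      (k, l :: ls.takeWhile (fun x => isTableLine x == k)) ::
        groupRuns (ls.dropWhile (fun x => isTableLine x == k))
termination_by ls => ls.length
decreasing_by
  simp only [List.length_cons]
  exact Nat.lt_succ_of_le (List.length_dropWhile_le _ _)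

def procGroup (g : Bool × List String) : List (String × Bool) :=
  if g.1 then [(PySem.Str.join "\n" g.2, true)]
  else
    let kept := g.2.filter keepLine
    if kept = [] then [] else [(PySem.Str.join "\n" kept, false)]

def baltB (lines : List String) : List (String × Bool) :=
  (groupRuns lines).flatMap procGroup

def split_page_into_blocks_alt (text : String) : List (String × Bool) :=
  baltB (pySplitNL text)

-- ===== PRECONDITION & SPEC =====
def Spec_split_page_into_blocks (text : String) (out : List (String × Bool)) : Prop := out = split_page_into_blocks_alt text
instance (text : String) (out : List (String × Bool)) : Decidable (Spec_split_page_into_blocks text out) := by unfold Spec_split_page_into_blocks; infer_instance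

-- ===== CLAIM (what is proved, stated in full; the proofs are below) =====
def Claim_equal_split_page_into_blocks : Prop := ∀ (text : String), Dom_split_page_into_blocks text → Spec_split_page_into_blocks text (split_page_into_blocks text)

-- ===== LEMMAS AND PROOFS =====

-- emitters: what a flush of a prose / table current_block produces
def emitP (cur : List String) : List (String × Bool) :=
  if cur = [] then [] else [(PySem.Str.join "\n" cur, false)]
def emitT (cur : List String) : List (String × Bool) :=
  if cur = [] then [] else [(PySem.Str.join "\n" cur, true)]

-- A's loop without the blocks accumulator, split by state
mutual
def Fspec : List String → List String → List (String × Bool)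
  | cur, [] => emitP cur
  | cur, l :: ls =>
      if isTableLine l then emitP cur ++ Tspec [l] ls
      else Fspec (if keepLine l then cur ++ [l] else cur) ls
def Tspec : List String → List String → List (String × Bool)
  | cur, [] => emitT cur
  | cur, l :: ls =>
      if isTableLine l then Tspec (cur ++ [l]) ls
      else emitT cur ++ Fspec (if keepLine l then [l] else []) ls
end

lemma keep_of_isTable (l : String) (h : isTableLine l = true) : keepLine l = true := by
  unfold isTableLine at h
  unfold keepLine
  by_contra hne
  simp only [ne_eq, bne_iff_ne, not_not] at hne
  rw [hne] at h
  exact absurd h (by decide)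

lemma loopA_eq_spec (lines : List String) (blocks : List (String × Bool))
    (cur : List String) (t : Bool) :
    loopA lines blocks cur t = blocks ++ (if t then Tspec cur lines else Fspec cur lines) := by
  induction lines generalizing blocks cur t with
  | nil => cases t <;> simp [loopA, Fspec, Tspec, emitP, emitT]
  | cons l ls ih =>
    cases hlt : isTableLine l <;> cases t
    · simp [loopA, hlt, ih, Fspec, keepLine]
    · simp [loopA, hlt, ih, Tspec, emitT, keepLine, List.append_assoc]
    · simp [loopA, hlt, ih, Fspec, emitP, List.append_assoc]
    · have hk : ¬ PySem.Str.strip l = "" := by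
        simpa [keepLine] using keep_of_isTable l hlt
      simp [loopA, hlt, ih, Tspec, hk]

lemma balt_cons_table (l : String) (ls : List String) (h : isTableLine l = true) :
    baltB (l :: ls) = emitT (l :: ls.takeWhile (fun x => isTableLine x)) ++
      baltB (ls.dropWhile (fun x => isTableLine x)) := by
  rw [baltB, groupRuns]
  simp only [h, List.flatMap_cons]
  rw [show (fun x => isTableLine x == true) = (fun x => isTableLine x) from funext (fun x => by simp)]
  simp [procGroup, emitT, baltB]

lemma balt_cons_prose (l : String) (ls : List String) (h : isTableLine l = false) :
    baltB (l :: ls) = emitP ((if keepLine l then [l] else []) ++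
        (ls.takeWhile (fun x => !isTableLine x)).filter keepLine) ++
      baltB (ls.dropWhile (fun x => !isTableLine x)) := by
  rw [baltB, groupRuns]
  simp only [h, List.flatMap_cons]
  rw [show (fun x => isTableLine x == false) = (fun x => !isTableLine x) from funext (fun x => by simp)]
  simp only [procGroup, emitP, List.filter_cons]
  cases hk : keepLine l <;> simp [baltB]

lemma FT_main : ∀ (n : Nat) (lines : List String), lines.length ≤ n →
    (∀ cur, Fspec cur lines =
      emitP (cur ++ (lines.takeWhile (fun x => !isTableLine x)).filter keepLine) ++
        baltB (lines.dropWhile (fun x => !isTableLine x))) ∧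
    (∀ cur, Tspec cur lines =
      emitT (cur ++ lines.takeWhile (fun x => isTableLine x)) ++
        baltB (lines.dropWhile (fun x => isTableLine x))) := by
  intro n
  induction n with
  | zero =>
    intro lines hlen
    have : lines = [] := List.eq_nil_of_length_eq_zero (Nat.le_zero.mp hlen)
    subst this
    constructor <;> intro cur <;> simp [Fspec, Tspec, baltB, groupRuns]
  | succ n ih =>
    intro lines hlen
    cases lines with
    | nil => constructor <;> intro cur <;> simp [Fspec, Tspec, baltB, groupRuns]
    | cons l ls =>
      have hls : ls.length ≤ n := by simpa using Nat.succ_le_succ_iff.mp hlen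
      constructor <;> intro cur <;> cases hlt : isTableLine l
      · -- Fspec, prose head: accumulate (or drop) l and recurse
        rw [Fspec]
        simp only [hlt, Bool.false_eq_true, if_false]
        rw [(ih ls hls).1]
        simp [hlt]
        cases hk : keepLine l <;> simp [hk, List.append_assoc]
      · -- Fspec, table head: flush prose, start a table block with l
        rw [Fspec]
        simp only [hlt]
        rw [(ih ls hls).2]
        simp [hlt, balt_cons_table l ls hlt]
      · -- Tspec, prose head: flush table, continue in prose state
        rw [Tspec]
        have h1 : List.takeWhile (fun x => isTableLine x) (l :: ls) = [] := by simp [hlt]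
        have h2 : List.dropWhile (fun x => isTableLine x) (l :: ls) = l :: ls := by simp [hlt]
        rw [h1, h2, balt_cons_prose l ls hlt, (ih ls hls).1]
        simp [hlt]
      · -- Tspec, table head: extend the table run
        rw [Tspec]
        simp only [hlt]
        rw [(ih ls hls).2]
        simp [hlt, List.append_assoc]

lemma F_nil_eq_balt (lines : List String) : Fspec [] lines = baltB lines := by
  rw [(FT_main lines.length lines le_rfl).1 []]
  cases lines with
  | nil => simp [baltB, groupRuns, emitP]
  | cons l ls =>
    cases hlt : isTableLine l
    · rw [balt_cons_prose l ls hlt]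
      simp [hlt]
      cases hk : keepLine l <;> simp [hk]
    · simp [hlt, emitP]

-- ===== VERDICT (by name: the statement is the Claim_ definition above) =====
theorem split_page_into_blocks_spec : Claim_equal_split_page_into_blocks := by
  intro text _
  unfold Spec_split_page_into_blocks split_page_into_blocks split_page_into_blocks_alt
  rw [loopA_eq_spec]
  simpa using F_nil_eq_balt (pySplitNL text)
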